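-- pv_equiv track=rewrite | github.com/ManInTheHam/Motion-Cuts | Project2WordCounter.py | word_count_and_length
-- ===== SOURCE A (Python) =====
-- def word_count_and_length(input_text):
--     if not input_text.strip():
--         raise ValueError(
--             "Error: Input text is empty. Please provide some text.")
--
--     words = input_text.split()
--     word_count = len(words)
--
--     total_length = sum(len(word) for word in words)
--
--     return word_count, total_length
-- ===== SOURCE B (Python) =====
-- def word_count_and_length(input_text):
--     # One character pass: manual tokenization, no split()/strip() intermediates.
--     in_word = False
--     word_count = 0
--     non_ws = 0
--     for c in input_text:
--         if c.isspace():
--             in_word = False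
--         else:
--             non_ws += 1
--             if not in_word:
--                 word_count += 1
--                 in_word = True
--     if non_ws == 0:
--         raise ValueError(
--             "Error: Input text is empty. Please provide some text.")
--     return word_count, non_ws
-- ===== Notes on version B (the rewrite author's own statement) =====
-- stated objective: alternative
-- what changed: Replaces strip()+split()+len()+sum() list building with a single character-by-character scan keeping an in_word flag, a word counter and a non-whitespace counter.
import Mathlib
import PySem

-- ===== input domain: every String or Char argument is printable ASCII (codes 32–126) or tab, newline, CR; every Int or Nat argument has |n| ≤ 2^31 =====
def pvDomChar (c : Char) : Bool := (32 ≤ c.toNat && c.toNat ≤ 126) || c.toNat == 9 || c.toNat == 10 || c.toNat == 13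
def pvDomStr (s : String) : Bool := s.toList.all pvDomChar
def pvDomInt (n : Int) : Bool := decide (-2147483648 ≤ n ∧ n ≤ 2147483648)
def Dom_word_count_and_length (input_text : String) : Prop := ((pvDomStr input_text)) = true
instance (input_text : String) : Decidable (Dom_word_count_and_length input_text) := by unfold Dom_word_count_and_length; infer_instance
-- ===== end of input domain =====

-- B replaces strip()+split()+sum(len) with a single one-pass character scan (alternative decomposition, same cost).


-- ===== PORT A =====
def word_count_and_length (input_text : String) : Int × Int :=
  if (PySem.Str.strip input_text).toList.isEmpty then
    (0, 0)  -- Python raises ValueError here; excluded by Pre_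
  else
    let words := PySem.Str.split₀ input_text
    let word_count : Int := words.length
    let total_length : Int := (words.map (fun w => (PySem.Str.len w : Int))).sum
    (word_count, total_length)

-- ===== PORT B =====
def word_count_and_length_alt (input_text : String) : Int × Int :=
  let st := input_text.toList.foldl
    (fun (st : Bool × Int × Int) c =>
      if PySem.Chars.isspace c then (false, st.2.1, st.2.2)
      else (true, if st.1 then st.2.1 else st.2.1 + 1, st.2.2 + 1))
    (false, 0, 0)
  if st.2.2 == 0 then
    (0, 0)  -- Python raises ValueError here; excluded by Pre_
  else
    (st.2.1, st.2.2)

-- ===== PRECONDITION & SPEC =====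
-- Pre_ excludes exactly the empty/all-whitespace inputs, on which Python A (and B) raise ValueError.
def Pre_word_count_and_length (input_text : String) : Prop :=
  input_text.toList.any (fun c => !PySem.Chars.isspace c) = true
instance (input_text : String) : Decidable (Pre_word_count_and_length input_text) := by
  unfold Pre_word_count_and_length; infer_instance
def pvWitness_word_count_and_length : String := "a b"

def Spec_word_count_and_length (input_text : String) (out : Int × Int) : Prop := out = word_count_and_length_alt input_text
instance (input_text : String) (out : Int × Int) : Decidable (Spec_word_count_and_length input_text out) := by unfold Spec_word_count_and_length; infer_instance

-- ===== CLAIM (what is proved, stated in full; the proofs are below) =====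
def Claim_equal_word_count_and_length : Prop := ∀ (input_text : String), Dom_word_count_and_length input_text → Pre_word_count_and_length input_text → Spec_word_count_and_length input_text (word_count_and_length input_text)

-- ===== LEMMAS AND PROOFS =====

-- step function of B's scan, named for the proofs
def pvStep (st : Bool × Int × Int) (c : Char) : Bool × Int × Int :=
  if PySem.Chars.isspace c then (false, st.2.1, st.2.2)
  else (true, if st.1 then st.2.1 else st.2.1 + 1, st.2.2 + 1)

def pvSumLen (l : List (List Char)) : Int := (l.map (fun w => (w.length : Int))).sum

-- the scan invariant: B's fold computes the word count and total length of split₀.go's output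
theorem pv_go_spec (cs : List Char) : ∀ (cur : List Char) (acc : List (List Char)),
    (((PySem.Chars.split₀.go cs cur acc).length : Int),
      pvSumLen (PySem.Chars.split₀.go cs cur acc))
    = (let st := cs.foldl pvStep
        (!cur.isEmpty, (acc.length : Int) + (if cur.isEmpty then 0 else 1),
          pvSumLen acc + cur.length)
       (st.2.1, st.2.2)) := by
  induction cs with
  | nil =>
    intro cur acc
    by_cases h : cur.isEmpty <;>
      simp [PySem.Chars.split₀.go, pvSumLen, List.isEmpty_iff.mp, h]
  | cons c rest ih =>
    intro cur acc
    rw [List.foldl_cons]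
    by_cases hs : PySem.Chars.isspace c
    · by_cases h : cur.isEmpty
      · have hc : cur = [] := List.isEmpty_iff.mp h
        subst hc
        simpa [PySem.Chars.split₀.go, hs, pvStep] using ih [] acc
      · have := ih [] (cur.reverse :: acc)
        simp only [PySem.Chars.split₀.go, hs, h, if_true, if_false,
          Bool.false_eq_true] at this ⊢
        rw [this]
        simp [pvStep, hs, pvSumLen]
        ring_nf
    · have := ih (c :: cur) acc
      simp only [PySem.Chars.split₀.go, hs, if_false, Bool.false_eq_true] at this ⊢
      rw [this]
      by_cases h : cur.isEmpty <;>
        simp [pvStep, hs, h] <;> ring_nf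

-- the scan's third component counts the non-whitespace characters
theorem pv_fold_snd (cs : List Char) : ∀ (st : Bool × Int × Int),
    (cs.foldl pvStep st).2.2 = st.2.2 + (cs.countP (fun c => !PySem.Chars.isspace c) : Int) := by
  induction cs with
  | nil => intro st; simp
  | cons c rest ih =>
    intro st
    rw [List.foldl_cons, ih]
    by_cases hs : PySem.Chars.isspace c <;>
      simp [pvStep, hs]; ring

-- a string with a non-whitespace character strips to something non-empty
theorem pv_strip_ne (s : List Char) (h : s.any (fun c => !PySem.Chars.isspace c) = true) :
    (PySem.Chars.strip s).isEmpty = false := by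
  simp only [List.any_eq_true, Bool.not_eq_true'] at h
  obtain ⟨c, hc, hcs⟩ := h
  have hd : c ∈ List.dropWhile PySem.Chars.isspace s := by
    have := List.takeWhile_append_dropWhile (p := PySem.Chars.isspace) (l := s)
    rw [← this] at hc
    rcases List.mem_append.mp hc with h1 | h2
    · exact absurd (List.mem_takeWhile_imp h1) (by simp [hcs])
    · exact h2
  simp only [PySem.Chars.strip, PySem.Chars.rstrip, PySem.Chars.lstrip,
    List.isEmpty_eq_false_iff, ne_eq, List.reverse_eq_nil_iff, List.dropWhile_eq_nil_iff]
  push Not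
  exact ⟨c, by simpa using hd, by simp [hcs]⟩

theorem word_count_and_length_spec : Claim_equal_word_count_and_length := by
  intro s _hDom hPre
  unfold Pre_word_count_and_length at hPre
  unfold Spec_word_count_and_length word_count_and_length word_count_and_length_alt
  have hcount : 0 < s.toList.countP (fun c => !PySem.Chars.isspace c) := by
    rcases List.any_eq_true.mp hPre with ⟨c, hc, hcs⟩
    exact List.countP_pos_iff.mpr ⟨c, hc, hcs⟩
  have hfold : s.toList.foldl
      (fun (st : Bool × Int × Int) c =>
        if PySem.Chars.isspace c then (false, st.2.1, st.2.2)
        else (true, if st.1 then st.2.1 else st.2.1 + 1, st.2.2 + 1))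
      (false, 0, 0) = s.toList.foldl pvStep (false, 0, 0) := rfl
  have hnz : (s.toList.foldl pvStep (false, 0, 0)).2.2 ≠ 0 := by
    rw [pv_fold_snd]
    simp only [zero_add]
    exact (Int.natCast_pos.mpr hcount).ne'
  have hstrip : (PySem.Str.strip s).toList.isEmpty = false := by
    rw [PySem.Str.toList_strip]
    exact pv_strip_ne s.toList hPre
  rw [hstrip, hfold]
  simp only [Bool.false_eq_true, if_false, beq_iff_eq, hnz, if_false]
  have hgo := pv_go_spec s.toList [] []
  simp only [List.isEmpty_nil, List.length_nil, Nat.cast_zero,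
    Bool.not_true, ite_true, pvSumLen, List.map_nil, List.sum_nil,
    add_zero] at hgo
  have hwords : (PySem.Str.split₀ s).map (fun w => (w.length : Int))
      = (PySem.Chars.split₀ s.toList).map (fun w => (w.length : Int)) := by
    have hb : (PySem.Str.split₀ s).map String.toList = PySem.Chars.split₀ s.toList :=
      PySem.Str.split₀_map_toList s
    rw [← hb, List.map_map]
    simp [Function.comp, String.length_toList]
  have hlen : (PySem.Str.split₀ s).length = (PySem.Chars.split₀ s.toList).length := by
    have hb : (PySem.Str.split₀ s).map String.toList = PySem.Chars.split₀ s.toList :=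
      PySem.Str.split₀_map_toList s
    rw [← hb, List.length_map]
  refine Prod.ext ?_ ?_
  · have := congrArg Prod.fst hgo
    simpa [PySem.Chars.split₀, hlen] using this
  · have := congrArg Prod.snd hgo
    simpa [pvSumLen, PySem.Chars.split₀, hwords, PySem.Chars.split₀] using this
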